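-- pv_equiv track=rewrite | github.com/pm4py/pm4py-core | pm4py/objects/dfg/utils/dfg_utils.py | add_to_most_probable_component
-- ===== SOURCE A (Python) =====
-- def add_to_most_probable_component(comps, act2, ingoing, outgoing):
--     """
--     Adds a lost component in parallel cut detection to the most probable component
--
--     Parameters
--     -------------
--     comps
--         Connected components
--     act2
--         Activity that has been missed
--     ingoing
--         Map of ingoing attributes
--     outgoing
--         Map of outgoing attributes
--
--     Returns
--     -------------
--     comps
--         Fixed connected components
--     """
--     sums = []
--     idx_max_sum = 0
--
--     for comp in comps:
--         summ = 0
--         for act1 in comp: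
--             if act1 in ingoing and act2 in ingoing[act1]:
--                 summ = summ + ingoing[act1][act2]
--             if act1 in outgoing and act2 in outgoing[act1]:
--                 summ = summ + outgoing[act1][act2]
--         sums.append(summ)
--         if sums[-1] > sums[idx_max_sum]:
--             idx_max_sum = len(sums) - 1
--
--     comps[idx_max_sum].add(act2)
--
--     return comps
-- ===== SOURCE B (Python) =====
-- def add_to_most_probable_component(comps, act2, ingoing, outgoing):
--     # inverted index: activity -> list of component indices containing it
--     index = {}
--     for ci, comp in enumerate(comps):
--         for act in comp:
--             index.setdefault(act, []).append(ci)
--     sums = [0] * len(comps)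
--     for edges in (ingoing, outgoing):
--         for act1, targets in edges.items():
--             if act2 in targets and act1 in index:
--                 v = targets[act2]
--                 for ci in index[act1]:
--                     sums[ci] += v
--     best = sums.index(max(sums))
--     comps[best].add(act2)
--     return comps
-- ===== Notes on version B (the rewrite author's own statement) =====
-- stated objective: alternative
-- what changed: Replaces the per-component scan over all activities (dict lookups per activity) by an inverted index activity->component indices built once, then a single pass over the edges touching act2 that accumulates into a sums vector; the winning index is taken as the first position of the maximum instead of a running argmax.
-- outside the precondition, e.g. on add_to_most_probable_component([], 'x', {}, {}): A raises IndexError, B raises ValueError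
import Mathlib
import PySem

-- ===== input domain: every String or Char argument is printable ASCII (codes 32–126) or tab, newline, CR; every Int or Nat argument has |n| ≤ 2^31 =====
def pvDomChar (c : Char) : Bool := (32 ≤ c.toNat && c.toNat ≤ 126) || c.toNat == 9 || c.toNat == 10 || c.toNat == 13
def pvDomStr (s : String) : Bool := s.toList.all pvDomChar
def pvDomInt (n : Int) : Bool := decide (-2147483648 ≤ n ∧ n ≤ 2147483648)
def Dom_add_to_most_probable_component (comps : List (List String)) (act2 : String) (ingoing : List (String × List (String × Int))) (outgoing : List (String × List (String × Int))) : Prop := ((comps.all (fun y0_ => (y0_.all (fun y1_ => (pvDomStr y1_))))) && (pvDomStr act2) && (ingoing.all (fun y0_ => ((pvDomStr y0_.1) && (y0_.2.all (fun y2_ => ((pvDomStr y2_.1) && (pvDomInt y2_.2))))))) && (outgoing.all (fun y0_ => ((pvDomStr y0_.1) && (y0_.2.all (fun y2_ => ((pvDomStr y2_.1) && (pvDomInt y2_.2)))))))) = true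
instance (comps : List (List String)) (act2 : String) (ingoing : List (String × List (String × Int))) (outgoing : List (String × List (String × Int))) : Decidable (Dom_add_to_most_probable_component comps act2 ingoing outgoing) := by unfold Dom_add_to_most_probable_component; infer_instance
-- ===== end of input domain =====

-- B replaces the per-component activity scan by an inverted index (activity -> component indices)
-- plus one pass over the edge maps, then takes the first index of the maximal sum; same return value.
-- Note: the Python A mutates comps in place (set.add); B performs the same mutation; the theorems
-- here are about the return value.


-- marshalling of the dict-of-dict arguments (Python dict semantics: last value wins, insertion order);
-- shared by both ports, it is not part of either algorithm
def pvDictOf (xs : List (String × List (String × Int))) : PySem.Dict String (PySem.Dict String Int) :=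
  PySem.Dict.ofList (xs.map (fun p => (p.1, PySem.Dict.ofList p.2)))

-- ===== PORT A =====
-- inner loop: summ over the activities of one component
def pvACompSum (dIn dOut : PySem.Dict String (PySem.Dict String Int)) (act2 : String) (comp : List String) : Int :=
  comp.foldl (fun summ act1 =>
    let summ' := match dIn.get? act1 with
      | some m => match m.get? act2 with
        | some v => summ + v
        | none => summ
      | none => summ
    match dOut.get? act1 with
      | some m => match m.get? act2 with
        | some v => summ' + v
        | none => summ'
      | none => summ') 0

-- one iteration of the main loop: append summ, update idx_max_sum
def pvAStep (dIn dOut : PySem.Dict String (PySem.Dict String Int)) (act2 : String) (st : List Int × Nat) (comp : List String) : List Int × Nat :=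
  let sums := st.1 ++ [pvACompSum dIn dOut act2 comp]
  if PySem.List.pyGetD sums (st.2 : Int) 0 < PySem.List.pyGetD sums (-1) 0
    then (sums, sums.length - 1) else (sums, st.2)

-- the main loop: builds sums and the running idx_max_sum
def pvALoop (dIn dOut : PySem.Dict String (PySem.Dict String Int)) (act2 : String) (comps : List (List String)) : List Int × Nat :=
  comps.foldl (pvAStep dIn dOut act2) ([], 0)

def add_to_most_probable_component (comps : List (List String)) (act2 : String) (ingoing : List (String × List (String × Int))) (outgoing : List (String × List (String × Int))) : List (List String) :=
  let dIn := pvDictOf ingoing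
  let dOut := pvDictOf outgoing
  let st := pvALoop dIn dOut act2 comps
  -- comps[idx_max_sum].add(act2): exact under Pre_ (comps ≠ [] keeps the index in range; Python raises IndexError on [])
  PySem.List.pySetD comps (st.2 : Int) (PySem.Set.add (PySem.List.pyGetD comps (st.2 : Int) []) act2)

-- ===== PORT B =====
-- inverted index: activity -> list of component indices containing it (with multiplicity, in order)
def pvIndex (comps : List (List String)) : PySem.Dict String (List Int) :=
  (PySem.List.enumerate comps 0).foldl
    (fun d p => p.2.foldl (fun d act => d.modify act [] (· ++ [p.1])) d) PySem.Dict.empty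

-- one edge-map item (act1, targets): add targets[act2] into sums at every component index of act1
def pvBStep (index : PySem.Dict String (List Int)) (act2 : String) (sums : List Int) (p : String × PySem.Dict String Int) : List Int :=
  match p.2.get? act2 with
  | none => sums
  | some v => match index.get? p.1 with
    | none => sums
    | some cis => cis.foldl (fun s ci => PySem.List.pySetD s ci (PySem.List.pyGetD s ci 0 + v)) sums

def add_to_most_probable_component_alt (comps : List (List String)) (act2 : String) (ingoing : List (String × List (String × Int))) (outgoing : List (String × List (String × Int))) : List (List String) :=
  let dIn := pvDictOf ingoing
  let dOut := pvDictOf outgoing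
  let index := pvIndex comps
  let sums := dOut.items.foldl (pvBStep index act2) (dIn.items.foldl (pvBStep index act2) (List.replicate comps.length 0))
  -- best = sums.index(max(sums)); on empty sums Python raises ValueError (outside Pre_): total default 0
  let best := match PySem.List.max? sums (fun x => x) with
    | none => 0
    | some m => (PySem.List.index? sums m).getD 0
  PySem.List.pySetD comps (best : Int) (PySem.Set.add (PySem.List.pyGetD comps (best : Int) []) act2)

-- ===== PRECONDITION & SPEC =====
-- Pre_ excludes only comps = [], where A raises IndexError (comps[0]) and B raises ValueError (max([])).
def Pre_add_to_most_probable_component (comps : List (List String)) (act2 : String) (ingoing : List (String × List (String × Int))) (outgoing : List (String × List (String × Int))) : Prop := comps ≠ []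
instance (comps : List (List String)) (act2 : String) (ingoing : List (String × List (String × Int))) (outgoing : List (String × List (String × Int))) : Decidable (Pre_add_to_most_probable_component comps act2 ingoing outgoing) := by unfold Pre_add_to_most_probable_component; infer_instance
def pvWitness_add_to_most_probable_component : List (List String) × String × (List (String × List (String × Int))) × (List (String × List (String × Int))) :=
  ([["a"], ["b"]], "c", [("b", [("c", 3)])], [])
def Spec_add_to_most_probable_component (comps : List (List String)) (act2 : String) (ingoing : List (String × List (String × Int))) (outgoing : List (String × List (String × Int))) (out : List (List String)) : Prop := out = add_to_most_probable_component_alt comps act2 ingoing outgoing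
instance (comps : List (List String)) (act2 : String) (ingoing : List (String × List (String × Int))) (outgoing : List (String × List (String × Int))) (out : List (List String)) : Decidable (Spec_add_to_most_probable_component comps act2 ingoing outgoing out) := by unfold Spec_add_to_most_probable_component; infer_instance

-- ===== CLAIM (what is proved, stated in full; the proofs are below) =====
def Claim_equal_add_to_most_probable_component : Prop := ∀ (comps : List (List String)) (act2 : String) (ingoing : List (String × List (String × Int))) (outgoing : List (String × List (String × Int))), Dom_add_to_most_probable_component comps act2 ingoing outgoing → Pre_add_to_most_probable_component comps act2 ingoing outgoing → Spec_add_to_most_probable_component comps act2 ingoing outgoing (add_to_most_probable_component comps act2 ingoing outgoing)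

-- ===== LEMMAS AND PROOFS =====

-- value an edge map m contributes for target act2 (0 when absent)
def pvMVal (act2 : String) (m : PySem.Dict String Int) : Int :=
  match m.get? act2 with
  | none => 0
  | some v => v

-- weight of one activity a w.r.t. one dict-of-dicts
def pvW (d : PySem.Dict String (PySem.Dict String Int)) (act2 : String) (a : String) : Int :=
  match d.get? a with
  | none => 0
  | some m => pvMVal act2 m

-- the (activity, component-index) pairs, in the order B's index build visits them
def pvPairs (comps : List (List String)) : List (String × Int) :=
  (PySem.List.enumerate comps 0).flatMap (fun p => p.2.map (fun a => (a, p.1)))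

-- invariant of A's running argmax: idx is the first position of the maximum
def pvInv (sums : List Int) (idx : Nat) : Prop :=
  ∃ m, PySem.List.max? sums (fun x => x) = some m ∧ PySem.List.index? sums m = some idx

-- A's inner loop is a plain weighted sum
lemma pvACompSum_eq (dIn dOut : PySem.Dict String (PySem.Dict String Int)) (act2 : String) (comp : List String) :
    pvACompSum dIn dOut act2 comp = (comp.map (fun a => pvW dIn act2 a + pvW dOut act2 a)).sum := by
  unfold pvACompSum
  have hf : (fun (summ : Int) (act1 : String) =>
      let summ' := match dIn.get? act1 with
        | some m => match m.get? act2 with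
          | some v => summ + v
          | none => summ
        | none => summ
      match dOut.get? act1 with
        | some m => match m.get? act2 with
          | some v => summ' + v
          | none => summ'
        | none => summ')
      = fun (s : Int) (a : String) => s + (pvW dIn act2 a + pvW dOut act2 a) := by
    funext s a
    simp only [pvW, pvMVal]
    cases h1 : dIn.get? a with
    | none =>
      cases h2 : dOut.get? a with
      | none => simp
      | some m2 => cases h3 : m2.get? act2 <;> simp [h3]
    | some m1 =>
      cases h2 : dOut.get? a with
      | none => cases h4 : m1.get? act2 <;> simp [h4]
      | some m2 => cases h4 : m1.get? act2 <;> cases h3 : m2.get? act2 <;> simp [h3, h4, add_assoc]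
  rw [hf, PySem.List.foldl_add]
  simp

lemma pvNestedFlat (es : List (Int × List String)) : ∀ (d : PySem.Dict String (List Int)),
    es.foldl (fun d p => p.2.foldl (fun d act => d.modify act [] (· ++ [p.1])) d) d
      = (es.flatMap (fun p => p.2.map (fun a => (a, p.1)))).foldl (fun d q => d.modify q.1 [] (· ++ [q.2])) d := by
  induction es with
  | nil => simp
  | cons e tl ih =>
    intro d
    simp only [List.foldl_cons, List.flatMap_cons, List.foldl_append, List.foldl_map, ih]

lemma pvCountAux : ∀ (cs : List (List String)) (s : Int) (a : String) (j : Nat), j < cs.length →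
    ((((PySem.List.enumerate cs s).flatMap (fun p => p.2.map (fun y => (y, p.1)))).filter
        (fun q => q.1 == a)).map (·.2)).count ((s + (j : Int))) = (cs.getD j []).count a := by
  intro cs
  induction cs with
  | nil => intro s a j hj; simp at hj
  | cons c tl ih =>
    intro s a j hj
    have hsplit : ((((PySem.List.enumerate (c :: tl) s).flatMap (fun p => p.2.map (fun y => (y, p.1)))).filter
        (fun q => q.1 == a)).map (·.2))
        = ((c.filter (fun y => y == a)).map (fun _ => s))
          ++ ((((PySem.List.enumerate tl (s+1)).flatMap (fun p => p.2.map (fun y => (y, p.1)))).filter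
              (fun q => q.1 == a)).map (·.2)) := by
      rw [PySem.List.enumerate_cons]
      simp [List.filter_map, List.map_map, Function.comp_def]
    rw [hsplit, List.count_append]
    have htl : ∀ x ∈ ((((PySem.List.enumerate tl (s+1)).flatMap (fun p => p.2.map (fun y => (y, p.1)))).filter
        (fun q => q.1 == a)).map (·.2)), ∃ k : Nat, x = (s + 1) + (k : Int) := by
      intro x hx
      simp only [List.mem_map, List.mem_filter, List.mem_flatMap, PySem.List.mem_enumerate_iff] at hx
      obtain ⟨q, ⟨⟨p, ⟨⟨k, hk, hp⟩, hq⟩⟩, _⟩, hxq⟩ := hx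
      subst hp
      obtain ⟨y, _, hy⟩ := hq
      exact ⟨k, by rw [← hxq, ← hy]⟩
    cases j with
    | zero =>
      have h1 : ((c.filter (fun y => y == a)).map (fun _ => s)).count (s + ((0:Nat) : Int)) = c.count a := by
        simp [List.count_eq_length_filter]
      have h2 : ((((PySem.List.enumerate tl (s+1)).flatMap (fun p => p.2.map (fun y => (y, p.1)))).filter
          (fun q => q.1 == a)).map (·.2)).count (s + ((0:Nat) : Int)) = 0 := by
        rw [List.count_eq_zero]
        intro hmem
        obtain ⟨k, hk⟩ := htl _ hmem
        omega
      rw [h1, h2]; simp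
    | succ j' =>
      have hj' : j' < tl.length := by simpa using hj
      have h1 : ((c.filter (fun y => y == a)).map (fun _ => s)).count (s + ((j'+1 : Nat) : Int)) = 0 := by
        rw [List.count_eq_zero]
        intro hmem
        simp only [List.mem_map] at hmem
        obtain ⟨y, _, hy⟩ := hmem
        omega
      have h2 := ih (s+1) a j' hj'
      have harg : (s + ((j'+1 : Nat) : Int)) = ((s+1) + (j' : Int)) := by push_cast; ring
      rw [h1, harg, h2]
      simp

-- index flattening
lemma pvIndex_eq_pairs (comps : List (List String)) :
    pvIndex comps = (pvPairs comps).foldl (fun d q => d.modify q.1 [] (· ++ [q.2])) PySem.Dict.empty := by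
  unfold pvIndex pvPairs
  exact pvNestedFlat _ _

lemma pvIndex_getD (comps : List (List String)) (a : String) :
    (pvIndex comps).getD a [] = (((pvPairs comps).filter (fun q => q.1 == a)).map (·.2)) := by
  rw [pvIndex_eq_pairs, PySem.Dict.getD_foldl_modify_append]
  simp [PySem.Dict.empty, PySem.Dict.getD, PySem.Dict.get?]

-- every stored index is a valid Nat index
lemma pvIndex_mem_range (comps : List (List String)) (a : String) (x : Int)
    (hx : x ∈ (pvIndex comps).getD a []) : 0 ≤ x ∧ x.toNat < comps.length := by
  rw [pvIndex_getD] at hx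
  simp only [pvPairs, List.mem_map, List.mem_filter, List.mem_flatMap,
    PySem.List.mem_enumerate_iff] at hx
  obtain ⟨q, ⟨⟨p, ⟨⟨k, hk, hp⟩, hq⟩⟩, _⟩, hxq⟩ := hx
  subst hp
  obtain ⟨y, _, hy⟩ := hq
  rw [← hxq, ← hy]
  simp
  omega

-- counting: occurrences of j in index[a] = occurrences of a in comps[j]
lemma pvIndex_count (comps : List (List String)) (a : String) (j : Nat) (hj : j < comps.length) :
    ((pvIndex comps).getD a []).count ((j : Int)) = (comps.getD j []).count a := by
  rw [pvIndex_getD]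
  have := pvCountAux comps 0 a j hj
  simpa using this

-- the add-at-indices fold, pointwise
lemma pvAddAt (v : Int) (cis : List Int) :
    ∀ (s : List Int), (∀ ci ∈ cis, 0 ≤ ci ∧ ci.toNat < s.length) →
      (cis.foldl (fun s ci => PySem.List.pySetD s ci (PySem.List.pyGetD s ci 0 + v)) s).length = s.length ∧
      ∀ j : Nat, j < s.length →
        (cis.foldl (fun s ci => PySem.List.pySetD s ci (PySem.List.pyGetD s ci 0 + v)) s).getD j 0
          = s.getD j 0 + v * (cis.count ((j : Int)) : Int) := by
  induction cis with
  | nil => intro s _; simp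
  | cons ci tl ih =>
    intro s h
    obtain ⟨hci0, hcilen⟩ := h ci (by simp)
    have hset : PySem.List.pySetD s ci (PySem.List.pyGetD s ci 0 + v)
        = s.set ci.toNat (s.getD ci.toNat 0 + v) := by
      rw [PySem.List.pySetD_of_nonneg _ _ hci0, PySem.List.pyGetD_eq_getElem s 0 hci0 (by omega)]
      congr 1
      rw [List.getD_eq_getElem s 0 hcilen]
    have hlen' : (s.set ci.toNat (s.getD ci.toNat 0 + v)).length = s.length := by simp
    have htl : ∀ c ∈ tl, 0 ≤ c ∧ c.toNat < (s.set ci.toNat (s.getD ci.toNat 0 + v)).length := by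
      intro c hc; rw [hlen']; exact h c (by simp [hc])
    obtain ⟨ihlen, ihpt⟩ := ih _ htl
    constructor
    · simp only [List.foldl_cons, hset]
      rw [ihlen, hlen']
    · intro j hj
      simp only [List.foldl_cons, hset]
      rw [ihpt j (by rw [hlen']; exact hj)]
      have hcount : (((ci :: tl).count ((j : Int)) : Int)) = ((tl.count ((j:Int)) : Int)) + (if (j : Int) = ci then 1 else 0) := by
        by_cases hh : (j:Int) = ci
        · simp [hh]
        · have hh' : ¬ (ci = (j:Int)) := fun e => hh e.symm
          simp [hh, hh']
      rw [hcount]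
      by_cases hjc : j = ci.toNat
      · subst hjc
        have hset2 : (s.set ci.toNat (s.getD ci.toNat 0 + v)).getD ci.toNat 0 = s.getD ci.toNat 0 + v := by
          rw [List.getD_eq_getElem?_getD, List.getElem?_set_self']
          simp [hcilen]
        rw [hset2]
        have : ((ci.toNat : Int) = ci) := by omega
        simp [this]
        ring
      · have : (s.set ci.toNat (s.getD ci.toNat 0 + v)).getD j 0 = s.getD j 0 := by
          rw [List.getD_eq_getElem?_getD, List.getElem?_set_ne (by omega), ← List.getD_eq_getElem?_getD]
        rw [this]
        have : ¬ ((j:Int) = ci) := by omega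
        simp [this]

-- B's fold over a list of dict items, pointwise
lemma pvBFold (comps : List (List String)) (act2 : String) (its : List (String × PySem.Dict String Int)) :
    ∀ (s : List Int), s.length = comps.length →
      (its.foldl (pvBStep (pvIndex comps) act2) s).length = comps.length ∧
      ∀ (j : Nat), j < comps.length →
        (its.foldl (pvBStep (pvIndex comps) act2) s).getD j 0
          = s.getD j 0 + (its.map (fun p => pvMVal act2 p.2 * (((comps.getD j []).count p.1 : Int)))).sum := by
  induction its with
  | nil => intro s hs; simpa using hs
  | cons p tl ih =>
    intro s hs
    simp only [List.foldl_cons]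
    cases hm : p.2.get? act2 with
    | none =>
      have hstep : pvBStep (pvIndex comps) act2 s p = s := by simp [pvBStep, hm]
      have hmv : pvMVal act2 p.2 = 0 := by simp [pvMVal, hm]
      obtain ⟨ihlen, ihpt⟩ := ih s hs
      refine ⟨by rw [hstep]; exact ihlen, ?_⟩
      intro j hj
      rw [hstep, ihpt j hj]
      simp [hmv]
    | some v =>
      have hmv : pvMVal act2 p.2 = v := by simp [pvMVal, hm]
      cases hidx : (pvIndex comps).get? p.1 with
      | none =>
        have hstep : pvBStep (pvIndex comps) act2 s p = s := by simp [pvBStep, hm, hidx]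
        have hgetD : (pvIndex comps).getD p.1 [] = [] := by
          simp [PySem.Dict.getD_eq_get?_getD, hidx]
        obtain ⟨ihlen, ihpt⟩ := ih s hs
        refine ⟨by rw [hstep]; exact ihlen, ?_⟩
        intro j hj
        have hcnt : ((comps.getD j []).count p.1) = 0 := by
          have := pvIndex_count comps p.1 j hj
          rw [hgetD] at this
          simpa using this.symm
        rw [hstep, ihpt j hj]
        simp only [List.map_cons, List.sum_cons, hmv]
        have hc2 : ((comps.getD j []).count p.1 : Int) = 0 := by exact_mod_cast hcnt
        rw [hc2]
        ring
      | some cis =>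
        have hcis : cis = (pvIndex comps).getD p.1 [] := by
          simp [PySem.Dict.getD_eq_get?_getD, hidx]
        have hstep : pvBStep (pvIndex comps) act2 s p
            = cis.foldl (fun s ci => PySem.List.pySetD s ci (PySem.List.pyGetD s ci 0 + v)) s := by
          simp [pvBStep, hm, hidx]
        have hbound : ∀ ci ∈ cis, 0 ≤ ci ∧ ci.toNat < s.length := by
          intro ci hci
          have := pvIndex_mem_range comps p.1 ci (by rw [← hcis]; exact hci)
          omega
        obtain ⟨alen, apt⟩ := pvAddAt v cis s hbound
        set s' := cis.foldl (fun s ci => PySem.List.pySetD s ci (PySem.List.pyGetD s ci 0 + v)) s with hs'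
        have hs'len : s'.length = comps.length := by rw [alen, hs]
        obtain ⟨ihlen, ihpt⟩ := ih s' hs'len
        refine ⟨by rw [hstep]; exact ihlen, ?_⟩
        intro j hj
        rw [hstep, ihpt j hj, apt j (by rw [hs]; exact hj)]
        have hcnt : (cis.count ((j : Int)) : Int) = ((comps.getD j []).count p.1 : Int) := by
          rw [hcis]
          exact_mod_cast pvIndex_count comps p.1 j hj
        rw [hcnt]
        simp only [List.map_cons, List.sum_cons, hmv]
        ring

-- a first-match sum over an assoc list with distinct keys is a find?
lemma pvSumIf (g : PySem.Dict String Int → Int) (a : String) :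
    ∀ (l : List (String × PySem.Dict String Int)), (l.map Prod.fst).Nodup →
    (l.map (fun p => if p.1 = a then g p.2 else 0)).sum
      = ((l.find? (fun p => p.1 == a)).map (fun p => g p.2)).getD 0 := by
  intro l
  induction l with
  | nil => simp
  | cons p tl ih =>
    intro hnd
    simp only [List.map_cons, List.sum_cons]
    by_cases hp : p.1 = a
    · have hfind : ((p :: tl).find? (fun q => q.1 == a)) = some p := by
        simp [hp]
      rw [hfind]
      have hnotin : (tl.map (fun q => if q.1 = a then g q.2 else 0)).sum = 0 := by
        apply List.sum_eq_zero
        intro x hx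
        simp only [List.mem_map] at hx
        obtain ⟨q, hq, hqx⟩ := hx
        have hpn : p.1 ∉ tl.map Prod.fst := by
          rw [List.map_cons] at hnd
          exact (List.nodup_cons.mp hnd).1
        have : ¬ (q.1 = a) := by
          intro hqa
          exact hpn (by rw [hp, ← hqa]; exact List.mem_map_of_mem hq)
        rw [← hqx]
        simp [this]
      rw [hnotin]
      simp [hp]
    · have hfind : ((p :: tl).find? (fun q => q.1 == a)) = tl.find? (fun q => q.1 == a) := by
        simp [hp]
      rw [hfind]
      have hnd' : (tl.map Prod.fst).Nodup := by
        rw [List.map_cons] at hnd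
        exact (List.nodup_cons.mp hnd).2
      rw [ih hnd']
      simp [hp]

-- a sum over the items of a dict against a single key is a lookup
lemma pvItemsSum (d : PySem.Dict String (PySem.Dict String Int)) (hnd : d.keys.Nodup) (act2 a : String) :
    (d.items.map (fun p => if p.1 = a then pvMVal act2 p.2 else 0)).sum = pvW d act2 a := by
  have hnd' : (d.items.map Prod.fst).Nodup := by
    simpa [PySem.Dict.keys] using hnd
  rw [pvSumIf (pvMVal act2) a d.items hnd']
  have hget : d.get? a = (d.items.find? (fun p => p.1 == a)).map (·.2) := rfl
  cases hf : d.items.find? (fun p => p.1 == a) with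
  | none =>
    have : d.get? a = none := by rw [hget, hf]; rfl
    simp [pvW, this]
  | some q =>
    have : d.get? a = some q.2 := by rw [hget, hf]; rfl
    simp [pvW, this]

-- per-component sum = sum over items of both dicts
lemma pvCompSum_items (dIn dOut : PySem.Dict String (PySem.Dict String Int))
    (hIn : dIn.keys.Nodup) (hOut : dOut.keys.Nodup) (act2 : String) (c : List String) :
    ((dIn.items ++ dOut.items).map (fun p => pvMVal act2 p.2 * (c.count p.1 : Int))).sum
      = (c.map (fun a => pvW dIn act2 a + pvW dOut act2 a)).sum := by
  induction c with
  | nil => simp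
  | cons a c' ih =>
    have hsplit : ∀ p : String × PySem.Dict String Int,
        pvMVal act2 p.2 * (((a :: c').count p.1 : Int))
          = pvMVal act2 p.2 * ((c'.count p.1 : Int)) + (if p.1 = a then pvMVal act2 p.2 else 0) := by
      intro p
      rw [List.count_cons]
      by_cases h : p.1 = a
      · simp [h]; ring
      · have h' : ¬ (a = p.1) := fun e => h e.symm
        simp [h, h']
    have hmapeq : ((dIn.items ++ dOut.items).map (fun p => pvMVal act2 p.2 * (((a :: c').count p.1 : Int))))
        = ((dIn.items ++ dOut.items).map (fun p =>
            pvMVal act2 p.2 * ((c'.count p.1 : Int)) + (if p.1 = a then pvMVal act2 p.2 else 0))) := by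
      apply List.map_congr_left
      intro p _
      exact hsplit p
    rw [hmapeq, PySem.List.sum_map_add_int, ih]
    have hif : ((dIn.items ++ dOut.items).map (fun p => if p.1 = a then pvMVal act2 p.2 else 0)).sum
        = pvW dIn act2 a + pvW dOut act2 a := by
      rw [List.map_append, List.sum_append, pvItemsSum dIn hIn act2 a, pvItemsSum dOut hOut act2 a]
    rw [hif]
    simp only [List.map_cons, List.sum_cons]
    ring

-- A's loop: accumulates the mapped sums and preserves the first-argmax invariant
lemma pvALoop_go (dIn dOut : PySem.Dict String (PySem.Dict String Int)) (act2 : String) (cs : List (List String)) :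
    ∀ (pre : List Int) (idx : Nat), pvInv pre idx →
      (cs.foldl (pvAStep dIn dOut act2) (pre, idx)).1 = pre ++ cs.map (pvACompSum dIn dOut act2) ∧
      pvInv (pre ++ cs.map (pvACompSum dIn dOut act2)) (cs.foldl (pvAStep dIn dOut act2) (pre, idx)).2 := by
  induction cs with
  | nil => intro pre idx hinv; simpa using hinv
  | cons c tl ih =>
    intro pre idx hinv
    obtain ⟨m, hmax, hidxm⟩ := hinv
    obtain ⟨hklt, hkval, _⟩ := PySem.List.getElem_of_index?_eq_some hidxm
    set x := pvACompSum dIn dOut act2 c with hx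
    -- the two lookups in the step
    have hg1 : PySem.List.pyGetD (pre ++ [x]) ((idx : Nat) : Int) 0 = m := by
      rw [PySem.List.pyGetD_natCast, List.getD_eq_getElem?_getD, List.getElem?_append_left hklt,
        List.getElem?_eq_getElem hklt]
      exact hkval
    have hg2 : PySem.List.pyGetD (pre ++ [x]) (-1) 0 = x :=
      PySem.List.pyGetD_neg_one_append_singleton pre x 0
    have hpre_ne : pre ≠ [] := by
      intro he
      rw [he] at hmax
      simp [PySem.List.max?] at hmax
    obtain ⟨h0, t0, hht⟩ : ∃ h0 t0, pre = h0 :: t0 := by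
      cases pre with
      | nil => exact absurd rfl hpre_ne
      | cons a b => exact ⟨a, b, rfl⟩
    have hfoldm : t0.foldl max h0 = m := by
      rw [hht] at hmax
      rw [PySem.List.max?_id_cons] at hmax
      exact (Option.some_inj.mp hmax)
    by_cases hlt : m < x
    · have hstep : pvAStep dIn dOut act2 (pre, idx) c = (pre ++ [x], pre.length) := by
        simp [pvAStep, ← hx, hg1, hg2, hlt]
      have hmax' : PySem.List.max? (pre ++ [x]) (fun y => y) = some x := by
        rw [hht, List.cons_append, PySem.List.max?_id_cons, List.foldl_append, hfoldm]
        simp [max_eq_right (le_of_lt hlt)]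
      have hnotin : x ∉ pre := by
        intro hmem
        have := PySem.List.max?_isMax hmax x hmem
        omega
      have hidx' : PySem.List.index? (pre ++ [x]) x = some pre.length :=
        PySem.List.index?_append_singleton_self pre x hnotin
      have := ih (pre ++ [x]) pre.length ⟨x, hmax', hidx'⟩
      rw [List.foldl_cons, hstep]
      simpa [List.append_assoc] using this
    · have hstep : pvAStep dIn dOut act2 (pre, idx) c = (pre ++ [x], idx) := by
        simp [pvAStep, ← hx, hg1, hg2, hlt]
      have hmax' : PySem.List.max? (pre ++ [x]) (fun y => y) = some m := by
        rw [hht, List.cons_append, PySem.List.max?_id_cons, List.foldl_append, hfoldm]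
        simp [max_eq_left (by omega : x ≤ m)]
      have hmem : m ∈ pre := PySem.List.max?_mem hmax
      have hidx' : PySem.List.index? (pre ++ [x]) m = some idx := by
        rw [PySem.List.index?_append_of_mem [x] hmem, hidxm]
      have := ih (pre ++ [x]) idx ⟨m, hmax', hidx'⟩
      rw [List.foldl_cons, hstep]
      simpa [List.append_assoc] using this

lemma pvALoop_spec (dIn dOut : PySem.Dict String (PySem.Dict String Int)) (act2 : String)
    (comps : List (List String)) (h : comps ≠ []) :
    (pvALoop dIn dOut act2 comps).1 = comps.map (pvACompSum dIn dOut act2) ∧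
    pvInv (comps.map (pvACompSum dIn dOut act2)) (pvALoop dIn dOut act2 comps).2 := by
  obtain ⟨c, rest, hcr⟩ : ∃ c rest, comps = c :: rest := by
    cases comps with
    | nil => exact absurd rfl h
    | cons a b => exact ⟨a, b, rfl⟩
  subst hcr
  unfold pvALoop
  rw [List.foldl_cons]
  set x := pvACompSum dIn dOut act2 c with hx
  have hstep : pvAStep dIn dOut act2 ([], 0) c = ([x], 0) := by
    simp [pvAStep, ← hx, PySem.List.pyGetD_zero_cons]
  rw [hstep]
  have hinv : pvInv [x] 0 := by
    refine ⟨x, ?_, ?_⟩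
    · rw [PySem.List.max?_id_cons]; simp
    · simp
  have := pvALoop_go dIn dOut act2 rest [x] 0 hinv
  simpa using this

-- B's sums list equals A's sums list
lemma pvSums_eq (comps : List (List String)) (act2 : String) (ingoing outgoing : List (String × List (String × Int))) :
    (pvDictOf outgoing).items.foldl (pvBStep (pvIndex comps) act2)
        ((pvDictOf ingoing).items.foldl (pvBStep (pvIndex comps) act2) (List.replicate comps.length 0))
      = comps.map (pvACompSum (pvDictOf ingoing) (pvDictOf outgoing) act2) := by
  have hIn : (pvDictOf ingoing).keys.Nodup := by
    unfold pvDictOf; exact PySem.Dict.nodup_keys_ofList _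
  have hOut : (pvDictOf outgoing).keys.Nodup := by
    unfold pvDictOf; exact PySem.Dict.nodup_keys_ofList _
  obtain ⟨hlen1, hpt1⟩ := pvBFold comps act2 (pvDictOf ingoing).items
    (List.replicate comps.length 0) (by simp)
  obtain ⟨hlen2, hpt2⟩ := pvBFold comps act2 (pvDictOf outgoing).items
    ((pvDictOf ingoing).items.foldl (pvBStep (pvIndex comps) act2) (List.replicate comps.length 0)) hlen1
  apply List.ext_getElem (by simpa using hlen2)
  intro j hj1 hj2
  have hjc : j < comps.length := by simpa using hj2
  have hgetD : ∀ (l : List Int) (hl : j < l.length), l[j] = l.getD j 0 := by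
    intro l hl; rw [List.getD_eq_getElem _ _ hl]
  rw [hgetD _ hj1, hgetD _ hj2]
  rw [hpt2 j hjc, hpt1 j hjc]
  have hrep : (List.replicate comps.length (0:Int)).getD j 0 = 0 := by
    simp [List.getD_eq_getElem?_getD, hjc]
  rw [hrep]
  have hcomb : ((pvDictOf ingoing).items.map (fun p => pvMVal act2 p.2 * (((comps.getD j []).count p.1 : Int)))).sum
      + ((pvDictOf outgoing).items.map (fun p => pvMVal act2 p.2 * (((comps.getD j []).count p.1 : Int)))).sum
      = (((pvDictOf ingoing).items ++ (pvDictOf outgoing).items).map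
          (fun p => pvMVal act2 p.2 * (((comps.getD j []).count p.1 : Int)))).sum := by
    rw [List.map_append, List.sum_append]
  have hmap : (comps.map (pvACompSum (pvDictOf ingoing) (pvDictOf outgoing) act2)).getD j 0
      = pvACompSum (pvDictOf ingoing) (pvDictOf outgoing) act2 (comps.getD j []) := by
    rw [List.getD_eq_getElem _ _ (by simpa using hj2), List.getElem_map,
      List.getD_eq_getElem _ _ hjc]
  rw [hmap, pvACompSum_eq]
  rw [zero_add, hcomb, pvCompSum_items _ _ hIn hOut]

-- ===== VERDICT (by name: the statement is the Claim_ definition above) =====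
theorem add_to_most_probable_component_spec : Claim_equal_add_to_most_probable_component := by
  intro comps act2 ingoing outgoing _hdom hpre
  unfold Spec_add_to_most_probable_component
  simp only [add_to_most_probable_component, add_to_most_probable_component_alt]
  obtain ⟨hA1, m, hmax, hidxm⟩ := pvALoop_spec (pvDictOf ingoing) (pvDictOf outgoing) act2 comps hpre
  rw [pvSums_eq comps act2 ingoing outgoing, hmax]
  simp only [hidxm, Option.getD_some]
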